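-- pv_equiv track=rewrite | github.com/SimeonHristov99/random_coding | task56/task56.py | solve
-- ===== SOURCE A (Python) =====
-- def solve(dictionary, s):
--     codes = {}
--     prev = None
--
--     for i, c in enumerate(dictionary):
--         codes[c] = i
--
--     for c in s:
--         if c in codes:
--             if prev is not None and prev > codes[c]:
--                 return False
--
--             prev = codes[c]
--
--     return True
-- ===== SOURCE B (Python) =====
-- def solve(dictionary, s):
--     codes = {}
--     for i, c in enumerate(dictionary):
--         codes[c] = i
--     seq = [codes[c] for c in s if c in codes]
--     return seq == sorted(seq)
-- ===== Notes on version B (the rewrite author's own statement) =====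
-- stated objective: alternative
-- what changed: Replaces A's stateful prev-tracking early-return scan with building the list of matched dictionary indices and checking it equals its sorted version.
import Mathlib
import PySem

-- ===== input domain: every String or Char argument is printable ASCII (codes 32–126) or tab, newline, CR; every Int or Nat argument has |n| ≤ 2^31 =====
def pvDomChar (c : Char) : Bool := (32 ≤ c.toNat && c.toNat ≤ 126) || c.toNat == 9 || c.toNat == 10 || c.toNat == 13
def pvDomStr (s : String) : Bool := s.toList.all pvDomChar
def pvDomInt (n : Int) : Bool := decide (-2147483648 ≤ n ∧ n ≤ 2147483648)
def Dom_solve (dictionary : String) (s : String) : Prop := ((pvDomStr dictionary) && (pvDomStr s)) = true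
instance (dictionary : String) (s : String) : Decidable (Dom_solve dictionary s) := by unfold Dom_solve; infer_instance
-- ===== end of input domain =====

-- B replaces A's incremental prev-tracking scan by building the list of dictionary
-- indices of the matched characters and comparing it with its sorted version (objective: alternative).

-- ===== PORT A =====
-- the 'for c in s' loop with early 'return False'; prev is the Option Int state
def solveLoop (codes : PySem.Dict Char Int) : List Char → Option Int → Bool
  | [], _ => true
  | c :: rest, prev =>
    match codes.get? c with
    | some v =>
      match prev with
      | some p => if p > v then false else solveLoop codes rest (some v)
      | none => solveLoop codes rest (some v)
    | none => solveLoop codes rest prev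

def solve (dictionary : String) (s : String) : Bool :=
  let codes := (PySem.List.enumerate dictionary.toList 0).foldl
    (fun d p => d.insert p.2 p.1) PySem.Dict.empty
  solveLoop codes s.toList none

-- ===== PORT B =====
def solve_alt (dictionary : String) (s : String) : Bool :=
  let codes := (PySem.List.enumerate dictionary.toList 0).foldl
    (fun d p => d.insert p.2 p.1) PySem.Dict.empty
  let seq := s.toList.filterMap (fun c => codes.get? c)
  decide (seq = PySem.List.sorted seq (fun x => x) false)

-- ===== PRECONDITION & SPEC =====
def Spec_solve (dictionary : String) (s : String) (out : Bool) : Prop := out = solve_alt dictionary s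
instance (dictionary : String) (s : String) (out : Bool) : Decidable (Spec_solve dictionary s out) := by unfold Spec_solve; infer_instance

-- ===== CLAIM (what is proved, stated in full; the proofs are below) =====
def Claim_equal_solve : Prop := ∀ (dictionary : String) (s : String), Dom_solve dictionary s → Spec_solve dictionary s (solve dictionary s)

-- ===== LEMMAS AND PROOFS =====

-- A's loop seen only through the sequence of matched codes
def chk : Option Int → List Int → Bool
  | _, [] => true
  | none, v :: t => chk (some v) t
  | some p, v :: t => if p > v then false else chk (some v) t

theorem solveLoop_eq_chk (codes : PySem.Dict Char Int) (l : List Char) (prev : Option Int) :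
    solveLoop codes l prev = chk prev (l.filterMap (fun c => codes.get? c)) := by
  induction l generalizing prev with
  | nil => rfl
  | cons c rest ih =>
    simp only [solveLoop, List.filterMap_cons]
    cases h : codes.get? c with
    | none => simp [ih]
    | some v =>
      cases prev with
      | none => simp [chk, ih]
      | some p =>
        by_cases hp : p > v
        · simp [chk, hp]
        · simp [chk, hp, ih]

theorem chk_some_eq_chain (p : Int) (seq : List Int) :
    chk (some p) seq = decide (List.IsChain (· ≤ ·) (p :: seq)) := by
  induction seq generalizing p with
  | nil => simp [chk]
  | cons v t ih =>
    by_cases hp : p > v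
    · simp [chk, hp, List.isChain_cons_cons]
    · simp only [chk, if_neg hp, ih]
      simp [List.isChain_cons_cons]
      omega

theorem chk_none_eq_chain (seq : List Int) :
    chk none seq = decide (List.IsChain (· ≤ ·) seq) := by
  cases seq with
  | nil => simp [chk]
  | cons v t => simpa [chk] using chk_some_eq_chain v t

theorem chain_iff_eq_sorted (seq : List Int) :
    List.IsChain (· ≤ ·) seq ↔ seq = PySem.List.sorted seq (fun x => x) false := by
  rw [List.isChain_iff_pairwise]
  constructor
  · intro h
    exact (PySem.List.sorted_eq_self_of_pairwise seq (fun x => x) h).symm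
  · intro h
    have := PySem.List.sorted_pairwise (xs := seq) (key := fun (x : Int) => x)
    rw [← h] at this
    exact this

-- ===== VERDICT (by name: the statement is the Claim_ definition above) =====
theorem solve_spec : Claim_equal_solve := by
  intro dictionary s _
  unfold Spec_solve solve solve_alt
  rw [solveLoop_eq_chk, chk_none_eq_chain]
  simp [chain_iff_eq_sorted]
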